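-- pv_equiv track=rewrite | github.com/hjungj21o/Interview-DS-A | hr_find_smallest_divisor_string.py | findSmallestDivisors
-- ===== SOURCE A (Python) =====
-- def is_divisible(s, t):
--     str = ""
--
--     while len(str) < len(s):
--         str += t
--         if str == s:
--             return True
--
--     return False
--
-- def findSmallestDivisors(s, t):
--     if is_divisible(s, t) is False:
--         return -1
--
--     str = ""
--     for char in t:
--         str += char
--         if is_divisible(t, str):
--             return len(str)
-- ===== SOURCE B (Python) =====
-- def findSmallestDivisors(s, t):
--     n, m = len(s), len(t)
--     if m == 0 or n == 0 or n % m != 0 or t * (n // m) != s: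
--         return -1
--     for d in range(1, m + 1):
--         if m % d == 0 and t[:d] * (m // d) == t:
--             return d
-- ===== Notes on version B (the rewrite author's own statement) =====
-- stated objective: faster
-- what changed: Replaces A's quadratic repeated-concatenation divisibility loops (and its scan over every prefix of t) by a single multiply-and-compare divisibility test plus a scan over divisor lengths of len(t) only, each checked with one slice-multiply comparison.
import Mathlib
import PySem

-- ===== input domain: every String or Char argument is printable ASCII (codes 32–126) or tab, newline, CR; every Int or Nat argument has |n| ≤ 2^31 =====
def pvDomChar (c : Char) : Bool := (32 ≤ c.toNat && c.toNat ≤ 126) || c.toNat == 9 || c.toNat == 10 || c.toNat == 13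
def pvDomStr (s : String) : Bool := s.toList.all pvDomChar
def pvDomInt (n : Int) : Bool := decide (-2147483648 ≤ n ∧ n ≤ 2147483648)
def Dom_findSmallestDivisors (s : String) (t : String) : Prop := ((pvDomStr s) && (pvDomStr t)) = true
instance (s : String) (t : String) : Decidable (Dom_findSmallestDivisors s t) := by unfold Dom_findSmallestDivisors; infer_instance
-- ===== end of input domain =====

-- B replaces A's repeated-concatenation divisibility loops by one multiply-and-compare check
-- and a scan over divisor lengths only; equivalence of return values is proved on Pre_ below.

-- ===== PORT A =====
-- is_divisible's while loop: str grows by t each pass; fuel = len(s) bounds the passes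
-- (fuel can only run out when t = "" and s ≠ "", where the Python loops forever — outside Pre_).
def pvGoDiv (s t : List Char) : Nat → List Char → Bool
  | fuel, str =>
    if str.length < s.length then
      match fuel with
      | 0 => false
      | Nat.succ f => if str ++ t = s then true else pvGoDiv s t f (str ++ t)
    else false

def isDivisible (s t : List Char) : Bool := pvGoDiv s t s.length []

-- the 'for char in t' loop of findSmallestDivisors; [] case = Python's fall-off-the-end None,
-- unreachable under Pre_ (the loop always returns by str = t at the latest).
def pvScanA (t : List Char) : List Char → List Char → Int
  | [], _ => -1
  | c :: rest, str =>
    let str' := str ++ [c]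
    if isDivisible t str' then (str'.length : Int) else pvScanA t rest str'

def findSmallestDivisors (s : String) (t : String) : Int :=
  if isDivisible s.toList t.toList = false then -1
  else pvScanA t.toList t.toList []

-- ===== PORT B =====
-- 'for d in range(1, m+1): if m % d == 0 and t[:d]*(m//d) == t: return d'; [] = fall off the end
-- (unreachable: d = m always matches).
def pvScanB (tl : List Char) (m : Int) : List Int → Int
  | [] => -1
  | d :: ds =>
    if PySem.Int.mod m d == 0 && PySem.List.pyRepeat (tl.take d.toNat) (PySem.Int.floordiv m d) == tl
    then d else pvScanB tl m ds

def findSmallestDivisors_alt (s : String) (t : String) : Int :=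
  let n : Int := (s.toList.length : Int)
  let m : Int := (t.toList.length : Int)
  if m == 0 || n == 0 || !(PySem.Int.mod n m == 0)
      || !(PySem.List.pyRepeat t.toList (PySem.Int.floordiv n m) == s.toList) then -1
  else pvScanB t.toList m (PySem.List.pyRange 1 (m + 1) 1)

-- ===== PRECONDITION & SPEC =====
-- Pre_ excludes only the inputs with t empty and s nonempty, on which A's while loop never terminates.
def Pre_findSmallestDivisors (s : String) (t : String) : Prop := t ≠ "" ∨ s = ""
instance (s : String) (t : String) : Decidable (Pre_findSmallestDivisors s t) := by
  unfold Pre_findSmallestDivisors; infer_instance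
def pvWitness_findSmallestDivisors : String × String := ("abab", "ab")

def Spec_findSmallestDivisors (s : String) (t : String) (out : Int) : Prop := out = findSmallestDivisors_alt s t
instance (s : String) (t : String) (out : Int) : Decidable (Spec_findSmallestDivisors s t out) := by
  unfold Spec_findSmallestDivisors; infer_instance

-- ===== CLAIM (what is proved, stated in full; the proofs are below) =====
def Claim_equal_findSmallestDivisors : Prop := ∀ (s : String) (t : String), Dom_findSmallestDivisors s t → Pre_findSmallestDivisors s t → Spec_findSmallestDivisors s t (findSmallestDivisors s t)

-- ===== LEMMAS AND PROOFS =====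

theorem flatten_replicate_length (k : Nat) (t : List Char) :
    ((List.replicate k t).flatten).length = k * t.length := by
  induction k with
  | zero => simp
  | succ k ih => simp [List.replicate_succ, ih, Nat.succ_mul]; omega

theorem flatten_replicate_succ (k : Nat) (t : List Char) :
    (List.replicate (k + 1) t).flatten = t ++ (List.replicate k t).flatten := by
  simp [List.replicate_succ]

-- when str is already as long as s, no further appends of nonempty t can reach s
theorem no_rep_of_ge (s t str : List Char) (ht : 1 ≤ t.length) (h : s.length ≤ str.length) :
    ¬ ∃ k, 1 ≤ k ∧ str ++ (List.replicate k t).flatten = s := by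
  rintro ⟨k, hk, heq⟩
  have hlen := congrArg List.length heq
  simp only [List.length_append, flatten_replicate_length] at hlen
  have : 1 * 1 ≤ k * t.length := Nat.mul_le_mul hk ht
  omega

-- A's while loop returns true iff appending t some k ≥ 1 times to str reaches s exactly.
theorem pvGoDiv_iff (s t : List Char) (ht : t ≠ []) :
    ∀ (fuel : Nat) (str : List Char), s.length ≤ str.length + fuel →
      (pvGoDiv s t fuel str = true ↔ ∃ k, 1 ≤ k ∧ str ++ (List.replicate k t).flatten = s) := by
  have htlen : 1 ≤ t.length := List.length_pos_iff.mpr ht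
  intro fuel
  induction fuel with
  | zero =>
    intro str hb
    have hge : ¬ (str.length < s.length) := by omega
    rw [pvGoDiv]
    simp only [if_neg hge, Bool.false_eq_true, false_iff]
    exact no_rep_of_ge s t str htlen (by omega)
  | succ f ih =>
    intro str hb
    rw [pvGoDiv]
    by_cases hlt : str.length < s.length
    · simp only [if_pos hlt]
      by_cases heq : str ++ t = s
      · simp only [if_pos heq, true_iff]
        exact ⟨1, le_refl 1, by simpa using heq⟩
      · simp only [if_neg heq]
        rw [ih (str ++ t) (by simp; omega)]
        constructor
        · rintro ⟨k, hk, hkeq⟩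
          refine ⟨k + 1, by omega, ?_⟩
          rw [flatten_replicate_succ, ← List.append_assoc]
          exact hkeq
        · rintro ⟨k, hk, hkeq⟩
          obtain ⟨k', rfl⟩ : ∃ k', k = k' + 1 := ⟨k - 1, by omega⟩
          rw [flatten_replicate_succ, ← List.append_assoc] at hkeq
          rcases Nat.eq_zero_or_pos k' with hk0 | hk1
          · subst hk0; simp at hkeq; exact absurd hkeq heq
          · exact ⟨k', hk1, hkeq⟩
    · simp only [if_neg hlt, Bool.false_eq_true, false_iff]
      exact no_rep_of_ge s t str htlen (by omega)

theorem isDivisible_iff (s t : List Char) (ht : t ≠ []) :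
    isDivisible s t = true ↔ ∃ k, 1 ≤ k ∧ (List.replicate k t).flatten = s := by
  have h := pvGoDiv_iff s t ht s.length [] (by simp)
  simpa [isDivisible] using h

-- bridge to B's closed-form divisibility check
theorem divisible_closed (s t : List Char) (ht : t ≠ []) :
    (∃ k, 1 ≤ k ∧ (List.replicate k t).flatten = s) ↔
      (s ≠ [] ∧ s.length % t.length = 0 ∧ (List.replicate (s.length / t.length) t).flatten = s) := by
  have htlen : 1 ≤ t.length := List.length_pos_iff.mpr ht
  constructor
  · rintro ⟨k, hk, heq⟩
    have hlen := congrArg List.length heq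
    rw [flatten_replicate_length] at hlen
    have hdiv : s.length / t.length = k := by
      rw [← hlen]; exact Nat.mul_div_cancel k (by omega)
    refine ⟨?_, ?_, ?_⟩
    · intro hnil; subst hnil
      simp only [List.length_nil] at hlen
      have : 1 * 1 ≤ k * t.length := Nat.mul_le_mul hk htlen
      omega
    · rw [← hlen]; exact Nat.mul_mod_left k t.length
    · rw [hdiv]; exact heq
  · rintro ⟨hne, hmod, heq⟩
    have hpos : 1 ≤ s.length := List.length_pos_iff.mpr hne
    refine ⟨s.length / t.length, ?_, heq⟩
    rcases Nat.eq_zero_or_pos (s.length / t.length) with h0 | h1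
    · exfalso
      have := congrArg List.length heq
      rw [flatten_replicate_length, h0] at this
      omega
    · exact h1

-- A's prefix test on a length-j prefix equals B's divisor test at d = j
theorem cond_eq (tl : List Char) (ht : tl ≠ []) (j : Nat) (hj1 : 1 ≤ j) (hjm : j ≤ tl.length) :
    isDivisible tl (tl.take j) =
      (PySem.Int.mod (tl.length : Int) (j : Int) == 0 &&
       PySem.List.pyRepeat (tl.take ((j : Int)).toNat) (PySem.Int.floordiv (tl.length : Int) (j : Int)) == tl) := by
  have hp : tl.take j ≠ [] := by
    intro h
    have := congrArg List.length h
    simp only [List.length_take, List.length_nil] at this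
    omega
  have hplen : (tl.take j).length = j := by
    simp only [List.length_take]; omega
  rw [Bool.eq_iff_iff]
  rw [isDivisible_iff tl (tl.take j) hp, divisible_closed tl (tl.take j) hp, hplen]
  simp [PySem.List.pyRepeat, ht, PySem.Int.mod_natCast, PySem.Int.floordiv_natCast]
  have hq : ((tl.length : Int) / (j : Int)).toNat = tl.length / j := by
    rw [← Int.natCast_div, Int.toNat_natCast]
  rw [hq, Int.natCast_dvd_natCast, Nat.dvd_iff_mod_eq_zero]

-- the two scans agree step by step
theorem scan_align (tl : List Char) (ht : tl ≠ []) :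
    ∀ rest str, str ++ rest = tl →
      pvScanA tl rest str = pvScanB tl (tl.length : Int) (PySem.List.pyRange ((str.length : Int) + 1) ((tl.length : Int) + 1) 1) := by
  intro rest
  induction rest with
  | nil =>
    intro str hcat
    have hstr : str = tl := by simpa using hcat
    subst hstr
    rw [PySem.List.pyRange_one_eq_nil (by omega)]
    rfl
  | cons c rest ih =>
    intro str hcat
    have hlen : str.length + 1 + rest.length = tl.length := by
      have := congrArg List.length hcat
      simp at this
      omega
    have hjm : str.length + 1 ≤ tl.length := by omega
    have hstr' : str ++ [c] = tl.take (str.length + 1) := by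
      have htl : tl = (str ++ [c]) ++ rest := by
        rw [List.append_assoc]
        simpa using hcat.symm
      rw [htl, List.take_left' (by simp)]
    have hd : ((str.length : Int) + 1) = ((str.length + 1 : Nat) : Int) := by push_cast; ring
    rw [pvScanA, hd, PySem.List.pyRange_one_cons (by push_cast; omega), pvScanB]
    have hcond : isDivisible tl (str ++ [c]) =
        (PySem.Int.mod (tl.length : Int) ((str.length + 1 : Nat) : Int) == 0 &&
         PySem.List.pyRepeat (tl.take (((str.length + 1 : Nat) : Int)).toNat)
           (PySem.Int.floordiv (tl.length : Int) ((str.length + 1 : Nat) : Int)) == tl) := by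
      rw [hstr']
      exact cond_eq tl ht (str.length + 1) (by omega) hjm
    rw [hcond]
    by_cases hb : (PySem.Int.mod (tl.length : Int) ((str.length + 1 : Nat) : Int) == 0 &&
         PySem.List.pyRepeat (tl.take (((str.length + 1 : Nat) : Int)).toNat)
           (PySem.Int.floordiv (tl.length : Int) ((str.length + 1 : Nat) : Int)) == tl) = true
    · simp only [hb, if_pos]
      simp
    · simp only [Bool.not_eq_true] at hb
      simp only [hb, Bool.false_eq_true, if_false]
      have hres := ih (str ++ [c]) (by rw [List.append_assoc]; simpa using hcat)
      have hlen' : (((str ++ [c]).length : Nat) : Int) = ((str.length + 1 : Nat) : Int) := by simp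
      rw [hlen'] at hres
      exact hres

-- B's guard is exactly the negation of A's divisibility characterisation
theorem guard_iff (sl tl : List Char) (h1 : 1 ≤ tl.length) :
    (((tl.length:Int) == 0 || (sl.length:Int) == 0 || !(PySem.Int.mod (sl.length:Int) (tl.length:Int) == 0)
       || !(PySem.List.pyRepeat tl (PySem.Int.floordiv (sl.length:Int) (tl.length:Int)) == sl)) = true)
      ↔ ¬ (sl ≠ [] ∧ sl.length % tl.length = 0 ∧ (List.replicate (sl.length / tl.length) tl).flatten = sl) := by
  have htl : tl ≠ [] := by intro h; rw [h] at h1; simp at h1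
  simp [PySem.List.pyRepeat]
  rw [← Int.natCast_div, Int.toNat_natCast, Int.natCast_dvd_natCast, ← Nat.dvd_iff_mod_eq_zero]
  tauto

-- ===== VERDICT (by name: the statement is the Claim_ definition above) =====
theorem findSmallestDivisors_spec : Claim_equal_findSmallestDivisors := by
  intro s t hdom hpre
  unfold Spec_findSmallestDivisors findSmallestDivisors findSmallestDivisors_alt
  by_cases htnil : t.toList = []
  · have hs : s = "" := by
      rcases hpre with h | h
      · exact absurd (String.toList_eq_nil_iff.mp htnil) h
      · exact h
    have hsl : s.toList = [] := by rw [hs]; rfl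
    rw [htnil, hsl]
    simp [isDivisible, pvGoDiv]
  · have hm1 : 1 ≤ t.toList.length := List.length_pos_iff.mpr htnil
    have hA := isDivisible_iff s.toList t.toList htnil
    rw [divisible_closed s.toList t.toList htnil] at hA
    dsimp only
    split_ifs with h1 h2 h3
    · rfl
    · exfalso
      rw [guard_iff s.toList t.toList hm1] at h2
      have hC := not_not.mp h2
      have := hA.mpr hC
      rw [h1] at this
      exact Bool.false_ne_true this
    · exfalso
      rw [guard_iff s.toList t.toList hm1] at h3
      have htrue : isDivisible s.toList t.toList = true := by
        revert h1; cases (isDivisible s.toList t.toList) <;> simp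
      exact h3 (hA.mp htrue)
    · have hsa := scan_align t.toList htnil t.toList [] rfl
      simpa using hsa
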